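-- pv_equiv track=rewrite | github.com/canfieldjuan/ATLAS | atlas_brain/autonomous/tasks/b2b_churn_reports.py | _scoped_report_vendor_filter
-- ===== SOURCE A (Python) =====
-- def _scoped_report_vendor_filter(vendors: list[str] | None) -> str | None:
--     """Return a stable vendor_filter token for scoped multi-vendor report rows."""
--     if not vendors:
--         return None
--     deduped: dict[str, str] = {}
--     for vendor in vendors:
--         text = str(vendor or "").strip()
--         if not text:
--             continue
--         deduped.setdefault(text.lower(), text)
--     if not deduped:
--         return None
--     return ",".join(deduped[key] for key in sorted(deduped))
-- ===== SOURCE B (Python) =====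
-- def _scoped_report_vendor_filter(vendors):
--     """Return a stable vendor_filter token for scoped multi-vendor report rows."""
--     if not vendors:
--         return None
--     cleaned = [t for t in (str(v or "").strip() for v in vendors) if t]
--     if not cleaned:
--         return None
--     parts = []
--     prev = None
--     for t in sorted(cleaned, key=str.lower):
--         k = t.lower()
--         if k != prev:
--             parts.append(t)
--             prev = k
--     return ",".join(parts)
-- ===== Notes on version B (the rewrite author's own statement) =====
-- stated objective: alternative
-- what changed: Replaces A's hash-dict dedup (setdefault keyed by lowercase) followed by sorting the keys and re-looking each one up with a sort-then-group pass: B stably sorts the cleaned strings by lowercase and keeps the first element of each equal-lowercase run, using no dict or set at all.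
import Mathlib
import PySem

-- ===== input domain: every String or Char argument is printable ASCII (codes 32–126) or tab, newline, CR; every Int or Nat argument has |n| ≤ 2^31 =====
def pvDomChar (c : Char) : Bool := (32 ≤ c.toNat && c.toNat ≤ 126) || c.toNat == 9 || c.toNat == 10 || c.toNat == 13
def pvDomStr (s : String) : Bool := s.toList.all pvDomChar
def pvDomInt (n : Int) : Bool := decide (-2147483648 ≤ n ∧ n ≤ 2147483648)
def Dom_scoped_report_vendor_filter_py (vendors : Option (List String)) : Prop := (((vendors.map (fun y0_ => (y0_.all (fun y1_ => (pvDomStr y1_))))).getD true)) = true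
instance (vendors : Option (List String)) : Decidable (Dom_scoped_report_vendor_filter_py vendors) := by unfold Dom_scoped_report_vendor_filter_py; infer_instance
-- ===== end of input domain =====

-- B replaces A's hash-dict dedup followed by a key sort and per-key lookups by a
-- sort-then-group pass: stably sort the cleaned strings by lowercase, keep the first
-- element of each equal-lowercase run. Alternative decomposition, similar cost.

-- ===== PORT A =====
def scoped_report_vendor_filter_py (vendors : Option (List String)) : Option String :=
  match vendors with
  | none => none
  | some vs =>
    if vs = [] then none
    else
      let deduped : PySem.Dict String String := vs.foldl (fun d vendor =>
        let text := PySem.Str.strip (if vendor = "" then "" else vendor)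
        if text = "" then d
        else d.setdefault (PySem.Str.lower text) text) PySem.Dict.empty
      if deduped.size = 0 then none
      else some (PySem.Str.join ","
        ((PySem.List.sorted deduped.keys (fun k => k) false).map (fun key => deduped.getD key "")))

-- ===== PORT B =====
def scoped_report_vendor_filter_py_alt (vendors : Option (List String)) : Option String :=
  match vendors with
  | none => none
  | some vs =>
    if vs = [] then none
    else
      let cleaned := (vs.map (fun v => PySem.Str.strip (if v = "" then "" else v))).filter
        (fun t => t ≠ "")
      if cleaned = [] then none
      else
        let ordered := PySem.List.sorted cleaned (fun t => PySem.Str.lower t) false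
        let parts := (ordered.foldl (fun (st : List String × Option String) t =>
            let k := PySem.Str.lower t
            if st.2 = some k then st else (st.1 ++ [t], some k))
          (([] : List String), (none : Option String))).1
        some (PySem.Str.join "," parts)

-- ===== PRECONDITION & SPEC =====
def Spec_scoped_report_vendor_filter_py (vendors : Option (List String)) (out : Option String) : Prop := out = scoped_report_vendor_filter_py_alt vendors
instance (vendors : Option (List String)) (out : Option String) : Decidable (Spec_scoped_report_vendor_filter_py vendors out) := by unfold Spec_scoped_report_vendor_filter_py; infer_instance

-- ===== CLAIM (what is proved, stated in full; the proofs are below) =====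
def Claim_equal_scoped_report_vendor_filter_py : Prop := ∀ (vendors : Option (List String)), Dom_scoped_report_vendor_filter_py vendors → Spec_scoped_report_vendor_filter_py vendors (scoped_report_vendor_filter_py vendors)

-- ===== LEMMAS AND PROOFS =====

-- A's loop over vs equals the setdefault fold over the cleaned list.
theorem pv_fold_filter (vs : List String) (d : PySem.Dict String String) :
    vs.foldl (fun d vendor =>
        let text := PySem.Str.strip (if vendor = "" then "" else vendor)
        if text = "" then d
        else d.setdefault (PySem.Str.lower text) text) d
    = ((vs.map (fun v => PySem.Str.strip (if v = "" then "" else v))).filter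
        (fun t => t ≠ "")).foldl (fun d t => d.setdefault (PySem.Str.lower t) t) d := by
  induction vs generalizing d with
  | nil => rfl
  | cons v vs ih =>
    simp only [List.foldl_cons, List.map_cons, List.filter_cons]
    by_cases h : PySem.Str.strip (if v = "" then "" else v) = "" <;>
      simp [h, ih]

-- membership in a dict and in its key list agree.
theorem pv_contains_keys (d : PySem.Dict String String) (k : String) :
    PySem.Set.contains d.keys k = d.contains k := by
  rw [Bool.eq_iff_iff]
  simp only [PySem.Set.contains, PySem.Dict.keys, PySem.Dict.contains,
    List.contains_eq_any_beq, List.any_map, List.any_eq_true, Function.comp, beq_iff_eq]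
  exact ⟨fun ⟨p, hp, h⟩ => ⟨p, hp, h.symm⟩, fun ⟨p, hp, h⟩ => ⟨p, hp, h.symm⟩⟩

-- get? after one setdefault.
theorem pv_get_setdefault (d : PySem.Dict String String) (k0 v k : String) :
    (d.setdefault k0 v).get? k = (d.get? k).or (if k0 = k then some v else none) := by
  by_cases hc : d.contains k0
  · rw [PySem.Dict.setdefault, if_pos hc]
    by_cases hk : k0 = k
    · subst hk
      have h1 : d.get? k0 ≠ none := by
        rw [Ne, PySem.Dict.get?_eq_none_iff_contains, hc]; simp
      obtain ⟨w, hw⟩ := Option.ne_none_iff_exists'.mp h1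
      simp [hw]
    · simp [hk]
  · rw [PySem.Dict.setdefault, if_neg hc]
    show (PySem.Dict.mk (d.items ++ [(k0, v)])).get? k = _
    by_cases hk : k0 = k <;>
      cases hfd : List.find? (fun p => p.1 == k) d.items <;>
        simp [PySem.Dict.get?, List.find?_append, hfd, beq_iff_eq, hk]

-- keys of the setdefault fold = Set.add fold of the lowered texts.
theorem pv_fold_keys (l : List String) (d : PySem.Dict String String) :
    (l.foldl (fun d t => d.setdefault (PySem.Str.lower t) t) d).keys
    = (l.map PySem.Str.lower).foldl PySem.Set.add d.keys := by
  induction l generalizing d with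
  | nil => rfl
  | cons t l ih =>
    simp only [List.foldl_cons, List.map_cons, ih]
    congr 1
    rw [PySem.Set.add, pv_contains_keys, PySem.Dict.setdefault]
    by_cases hc : d.contains (PySem.Str.lower t) <;> simp [hc, PySem.Dict.keys]

-- get? of the setdefault fold = first element of l whose lowering is the key.
theorem pv_fold_get (l : List String) (d : PySem.Dict String String) (k : String) :
    (l.foldl (fun d t => d.setdefault (PySem.Str.lower t) t) d).get? k
    = (d.get? k).or (l.find? (fun t => PySem.Str.lower t == k)) := by
  induction l generalizing d with
  | nil => simp
  | cons t l ih =>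
    simp only [List.foldl_cons, ih, pv_get_setdefault, Option.or_assoc]
    congr 1
    by_cases hk : PySem.Str.lower t = k <;> simp [beq_iff_eq, hk]

-- proof-only helper: first-occurrence (lowered key, text) pairs of a list, given seen keys s.
def pvFirsts (l : List String) (s : PySem.Set String) : List (String × String) :=
  match l with
  | [] => []
  | t :: l =>
    let k := PySem.Str.lower t
    if PySem.Set.contains s k then pvFirsts l s
    else (k, t) :: pvFirsts l (PySem.Set.add s k)

-- the keys of pvFirsts, behind s, are the Set.add fold of the lowered texts.
theorem pv_firsts_keys (l : List String) (s : PySem.Set String) :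
    s ++ (pvFirsts l s).map Prod.fst = (l.map PySem.Str.lower).foldl PySem.Set.add s := by
  induction l generalizing s with
  | nil => simp [pvFirsts]
  | cons t l ih =>
    simp only [List.map_cons, List.foldl_cons]
    by_cases h : PySem.Str.lower t ∈ s
    · have ha : PySem.Set.add s (PySem.Str.lower t) = s := by simp [PySem.Set.add, h]
      rw [show pvFirsts (t :: l) s = pvFirsts l s from by simp [pvFirsts, h], ha, ih]
    · have hpf : pvFirsts (t :: l) s
          = (PySem.Str.lower t, t) :: pvFirsts l (PySem.Set.add s (PySem.Str.lower t)) := by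
        simp [pvFirsts, h]
      have ha : PySem.Set.add s (PySem.Str.lower t) = s ++ [PySem.Str.lower t] := by
        simp [PySem.Set.add, h]
      rw [hpf]
      simp only [List.map_cons]
      rw [List.append_cons, ← ha, ih]

-- every collected pair holds the FIRST element of l with that lowered key.
theorem pv_firsts_val (l : List String) (s : PySem.Set String) (k v : String)
    (h : (k, v) ∈ pvFirsts l s) :
    k ∉ s ∧ l.find? (fun t => PySem.Str.lower t == k) = some v := by
  induction l generalizing s with
  | nil => simp [pvFirsts] at h
  | cons t l ih =>
    by_cases hc : PySem.Str.lower t ∈ s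
    · rw [show pvFirsts (t :: l) s = pvFirsts l s from by simp [pvFirsts, hc]] at h
      obtain ⟨hs, hf⟩ := ih _ h
      have hne : ¬ (PySem.Str.lower t = k) := fun he => hs (he ▸ hc)
      exact ⟨hs, by simp [beq_iff_eq, hne, hf]⟩
    · rw [show pvFirsts (t :: l) s
          = (PySem.Str.lower t, t) :: pvFirsts l (PySem.Set.add s (PySem.Str.lower t)) from by
        simp [pvFirsts, hc]] at h
      rcases List.mem_cons.mp h with heq | hmem
      · have hk : k = PySem.Str.lower t := congrArg Prod.fst heq
        have hv : v = t := congrArg Prod.snd heq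
        subst hk; subst hv
        exact ⟨hc, by simp⟩
      · obtain ⟨hs, hf⟩ := ih _ hmem
        rw [show PySem.Set.add s (PySem.Str.lower t) = s ++ [PySem.Str.lower t] from by
          simp [PySem.Set.add, hc]] at hs
        simp only [List.mem_append, List.mem_singleton, not_or] at hs
        have hne : ¬ (PySem.Str.lower t = k) := fun he => hs.2 he.symm
        exact ⟨hs.1, by simp [beq_iff_eq, hne, hf]⟩

-- the keys collected by pvFirsts are a sublist of the lowered input.
theorem pv_firsts_sublist (l : List String) (s : PySem.Set String) :
    ((pvFirsts l s).map Prod.fst).Sublist (l.map PySem.Str.lower) := by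
  induction l generalizing s with
  | nil => simp [pvFirsts]
  | cons t l ih =>
    by_cases hc : PySem.Str.lower t ∈ s
    · rw [show pvFirsts (t :: l) s = pvFirsts l s from by simp [pvFirsts, hc]]
      exact (ih s).trans (List.sublist_cons_self _ _)
    · rw [show pvFirsts (t :: l) s
          = (PySem.Str.lower t, t) :: pvFirsts l (PySem.Set.add s (PySem.Str.lower t)) from by
        simp [pvFirsts, hc]]
      simpa using (ih (PySem.Set.add s (PySem.Str.lower t))).cons₂ (PySem.Str.lower t)

-- inserting into a key-sorted list commutes with filtering on one lowered key.
theorem pv_filter_insertBy (x k : String) (ys : List String)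
    (hys : ys.Pairwise (fun a b => PySem.Str.lower a ≤ PySem.Str.lower b)) :
    (PySem.List.insertBy (fun a b => decide (PySem.Str.lower a < PySem.Str.lower b)) x ys).filter
        (fun y => PySem.Str.lower y == k)
    = ys.filter (fun y => PySem.Str.lower y == k)
      ++ (if PySem.Str.lower x == k then [x] else []) := by
  induction ys with
  | nil =>
    by_cases hx : PySem.Str.lower x = k <;>
      simp [PySem.List.insertBy, List.filter, hx]
  | cons y ys ih =>
    rw [List.pairwise_cons] at hys
    by_cases hlt : PySem.Str.lower x < PySem.Str.lower y
    · rw [show PySem.List.insertBy (fun a b => decide (PySem.Str.lower a < PySem.Str.lower b)) x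
          (y :: ys) = x :: y :: ys from by
        rw [PySem.List.insertBy]; simp [hlt]]
      by_cases hx : PySem.Str.lower x = k
      · have hnil : (y :: ys).filter (fun y => PySem.Str.lower y == k) = [] := by
          rw [List.filter_eq_nil_iff]
          intro z hz
          have hyz : PySem.Str.lower y ≤ PySem.Str.lower z := by
            rcases List.mem_cons.mp hz with rfl | hz
            · exact le_refl _
            · exact hys.1 z hz
          have : k < PySem.Str.lower z := hx ▸ lt_of_lt_of_le hlt hyz
          simp [beq_iff_eq, ne_of_gt this]
        rw [List.filter_cons_of_pos (by simp [hx]), hnil, if_pos (by simp [hx])]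
        rfl
      · rw [List.filter_cons_of_neg (by simp [hx]), if_neg (by simp [hx]), List.append_nil]
    · rw [show PySem.List.insertBy (fun a b => decide (PySem.Str.lower a < PySem.Str.lower b)) x
          (y :: ys)
          = y :: PySem.List.insertBy (fun a b => decide (PySem.Str.lower a < PySem.Str.lower b))
              x ys from by
        rw [PySem.List.insertBy]; simp [hlt]]
      by_cases hy : PySem.Str.lower y = k
      · rw [List.filter_cons_of_pos (by simp [hy]), List.filter_cons_of_pos (by simp [hy]),
          ih hys.2, List.cons_append]
      · rw [List.filter_cons_of_neg (by simp [hy]), List.filter_cons_of_neg (by simp [hy]),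
          ih hys.2]

-- STABILITY of the sort: filtering one lowered key commutes with sorting by lowercase.
theorem pv_sorted_filter (xs : List String) (k : String) :
    (PySem.List.sorted xs (fun t => PySem.Str.lower t) false).filter
        (fun t => PySem.Str.lower t == k)
    = xs.filter (fun t => PySem.Str.lower t == k) := by
  induction xs using List.reverseRecOn with
  | nil => rfl
  | append_singleton xs x ih =>
    have hsnoc : PySem.List.sorted (xs ++ [x]) (fun t => PySem.Str.lower t) false
        = PySem.List.insertBy (fun a b => decide (PySem.Str.lower a < PySem.Str.lower b)) x
            (PySem.List.sorted xs (fun t => PySem.Str.lower t) false) := by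
      rw [PySem.List.sorted_eq_foldl_insertBy, PySem.List.sorted_eq_foldl_insertBy,
        List.foldl_append]
      rfl
    rw [hsnoc, pv_filter_insertBy x k _ (PySem.List.sorted_pairwise xs _), ih,
      List.filter_append]
    by_cases hx : PySem.Str.lower x = k
    · simp [List.filter, hx]
    · have hb : (PySem.Str.lower x == k) = false := beq_eq_false_iff_ne.mpr hx
      simp [List.filter, hb]

-- hence find? on one lowered key is unchanged by the sort.
theorem pv_sorted_find (xs : List String) (k : String) :
    (PySem.List.sorted xs (fun t => PySem.Str.lower t) false).find?
        (fun t => PySem.Str.lower t == k)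
    = xs.find? (fun t => PySem.Str.lower t == k) := by
  rw [← List.head?_filter, ← List.head?_filter, pv_sorted_filter]

-- B's prev/parts scan over a key-sorted list collects exactly the pvFirsts texts.
theorem pv_scan (S : List String) (out : List String) (p : Option String)
    (s : PySem.Set String)
    (h1 : S.Pairwise (fun a b => PySem.Str.lower a ≤ PySem.Str.lower b))
    (h2 : ∀ x ∈ s, ∀ t ∈ S, x = PySem.Str.lower t → p = some x)
    (h3 : ∀ p', p = some p' → p' ∈ s)
    (h4 : ∀ p', p = some p' → ∀ t ∈ S, p' ≤ PySem.Str.lower t) :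
    (S.foldl (fun (st : List String × Option String) t =>
        let k := PySem.Str.lower t
        if st.2 = some k then st else (st.1 ++ [t], some k)) (out, p)).1
    = out ++ (pvFirsts S s).map Prod.snd := by
  induction S generalizing out p s with
  | nil => simp [pvFirsts]
  | cons t S ih =>
    rw [List.pairwise_cons] at h1
    rw [List.foldl_cons]
    by_cases hp : p = some (PySem.Str.lower t)
    · have hmem : PySem.Str.lower t ∈ s := h3 _ hp
      rw [show (let k := PySem.Str.lower t;
          if (out, p).2 = some k then (out, p) else ((out, p).1 ++ [t], some k)) = (out, p) from by
        simp [hp],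
        show pvFirsts (t :: S) s = pvFirsts S s from by simp [pvFirsts, hmem]]
      exact ih out p s h1.2 (fun x hx t' ht' he => h2 x hx t' (List.mem_cons_of_mem t ht') he)
        h3 (fun p' hp' t' ht' => h4 p' hp' t' (List.mem_cons_of_mem t ht'))
    · have hnmem : PySem.Str.lower t ∉ s := by
        intro hin
        exact hp (h2 _ hin t (List.mem_cons_self) rfl)
      rw [show (let k := PySem.Str.lower t;
          if (out, p).2 = some k then (out, p) else ((out, p).1 ++ [t], some k))
          = (out ++ [t], some (PySem.Str.lower t)) from by simp [hp],
        show pvFirsts (t :: S) s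
          = (PySem.Str.lower t, t) :: pvFirsts S (PySem.Set.add s (PySem.Str.lower t)) from by
        simp [pvFirsts, hnmem]]
      rw [ih (out ++ [t]) (some (PySem.Str.lower t)) (PySem.Set.add s (PySem.Str.lower t)) h1.2
        ?_ ?_ ?_]
      · simp
      · intro x hx t' ht' he
        rcases (PySem.Set.mem_add s _ x).mp hx with hxs | rfl
        · exfalso
          have hpx : p = some x := h2 x hxs t' (List.mem_cons_of_mem t ht') he
          have hle : x ≤ PySem.Str.lower t := h4 x hpx t (List.mem_cons_self)
          have hge : PySem.Str.lower t ≤ x := he ▸ h1.1 t' ht'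
          exact hp (hpx.trans (congrArg some (le_antisymm hle hge)))
        · rfl
      · intro p' hp'
        exact (PySem.Set.mem_add s _ _).mpr (Or.inr (Option.some.inj hp').symm)
      · intro p' hp' t' ht'
        exact (Option.some.inj hp') ▸ h1.1 t' ht'

-- ===== VERDICT (by name: the statement is the Claim_ definition above) =====
theorem scoped_report_vendor_filter_py_spec : Claim_equal_scoped_report_vendor_filter_py := by
  intro vendors _
  unfold Spec_scoped_report_vendor_filter_py scoped_report_vendor_filter_py
    scoped_report_vendor_filter_py_alt
  match vendors with
  | none => rfl
  | some vs =>
    by_cases hvs : vs = []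
    · simp [hvs]
    simp only [hvs, if_false]
    rw [pv_fold_filter]
    generalize (vs.map (fun v => PySem.Str.strip (if v = "" then "" else v))).filter
        (fun t => t ≠ "") = cleaned
    by_cases hc : cleaned = []
    · simp [hc, PySem.Dict.size, PySem.Dict.empty]
    · have hkeys : ((cleaned.foldl (fun d t => d.setdefault (PySem.Str.lower t) t)
          PySem.Dict.empty).keys) = PySem.Set.ofList (cleaned.map PySem.Str.lower) := by
        rw [pv_fold_keys]; rfl
      have hne : ¬ ((cleaned.foldl (fun d t => d.setdefault (PySem.Str.lower t) t)
          PySem.Dict.empty).size = 0) := by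
        intro h0
        have hkn : ((cleaned.foldl (fun d t => d.setdefault (PySem.Str.lower t) t)
            PySem.Dict.empty).keys) = [] := by
          simp only [PySem.Dict.keys, PySem.Dict.size] at *
          exact List.map_eq_nil_iff.mpr (List.length_eq_zero_iff.mp h0)
        rw [hkeys] at hkn
        rcases List.exists_mem_of_ne_nil cleaned hc with ⟨x, hx⟩
        have hm : PySem.Str.lower x ∈ PySem.Set.ofList (cleaned.map PySem.Str.lower) :=
          (PySem.Set.mem_ofList _ _).mpr (List.mem_map_of_mem hx)
        rw [hkn] at hm
        exact List.not_mem_nil hm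
      simp only [if_neg hne, if_neg hc]
      refine congrArg some (congrArg (PySem.Str.join ",") ?_)
      rw [hkeys]
      -- the sorted cleaned list, its first-occurrence pairs, and the canonical lookup g
      set S := PySem.List.sorted cleaned (fun t => PySem.Str.lower t) false with hS
      set g : String → String :=
        fun k => (cleaned.find? (fun t => PySem.Str.lower t == k)).getD "" with hg
      -- B's scan = pvFirsts texts on S
      rw [pv_scan S [] none PySem.Set.empty (PySem.List.sorted_pairwise cleaned _)
        (by intro x hx; simp [PySem.Set.empty] at hx) (by intro p' hp'; cases hp')
        (by intro p' hp'; cases hp'), List.nil_append]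
      -- keys of pvFirsts S ∅ = Set.ofList of S's lowered texts
      have hfstkeys : (pvFirsts S PySem.Set.empty).map Prod.fst
          = PySem.Set.ofList (S.map PySem.Str.lower) := by
        have := pv_firsts_keys S PySem.Set.empty
        simpa [PySem.Set.ofList, PySem.Set.empty] using this
      -- each collected pair is (k, g k), by the sort's stability
      have hpair : ∀ p ∈ pvFirsts S PySem.Set.empty, p = (p.1, g p.1) := by
        intro p hp
        obtain ⟨-, hf⟩ := pv_firsts_val S PySem.Set.empty p.1 p.2 hp
        rw [hS, pv_sorted_find] at hf
        have : g p.1 = p.2 := by rw [hg]; simp [hf]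
        simp [this]
      have hfirsts : pvFirsts S PySem.Set.empty
          = (PySem.Set.ofList (S.map PySem.Str.lower)).map (fun k => (k, g k)) := by
        rw [← hfstkeys, List.map_map]
        calc pvFirsts S PySem.Set.empty
            = (pvFirsts S PySem.Set.empty).map id := (List.map_id _).symm
          _ = (pvFirsts S PySem.Set.empty).map ((fun k => (k, g k)) ∘ Prod.fst) := by
              refine List.map_congr_left ?_
              intro p hp
              simpa [Function.comp] using (hpair p hp).symm ▸ rfl
      -- the key list collected on S IS the sorted key set of cleaned
      have hnodupS : (PySem.Set.ofList (S.map PySem.Str.lower)).Nodup :=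
        PySem.Set.nodup_ofList _
      have hpwS : (PySem.Set.ofList (S.map PySem.Str.lower)).Pairwise (· < ·) := by
        have hle : ((pvFirsts S PySem.Set.empty).map Prod.fst).Pairwise (· ≤ ·) :=
          (PySem.List.sorted_map_key_pairwise cleaned _).sublist (pv_firsts_sublist S _)
        rw [hfstkeys] at hle
        exact (hle.and hnodupS).imp (fun h => lt_of_le_of_ne h.1 h.2)
      have hpermS : (PySem.Set.ofList (S.map PySem.Str.lower)).Perm
          (PySem.Set.ofList (cleaned.map PySem.Str.lower)) := by
        rw [List.perm_ext_iff_of_nodup hnodupS (PySem.Set.nodup_ofList _)]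
        intro a
        rw [PySem.Set.mem_ofList, PySem.Set.mem_ofList]
        exact List.Perm.mem_iff ((PySem.List.sorted_perm cleaned _ _).map PySem.Str.lower)
      have hsortkeys : PySem.List.sorted (PySem.Set.ofList (cleaned.map PySem.Str.lower))
          (fun k => k) false = PySem.Set.ofList (S.map PySem.Str.lower) :=
        PySem.List.sorted_eq_of_perm_of_pairwise_lt _ _ _ hpermS hpwS
      rw [hfirsts, List.map_map, hsortkeys]
      refine List.map_congr_left ?_
      intro k hk
      have hk' : k ∈ cleaned.map PySem.Str.lower := by
        rw [← PySem.Set.mem_ofList]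
        exact hpermS.subset hk
      obtain ⟨t, ht, hlt⟩ := List.mem_map.mp hk'
      obtain ⟨v, hv⟩ := Option.isSome_iff_exists.mp
        (List.find?_isSome.mpr ⟨t, ht, by simp [hlt]⟩ :
          (cleaned.find? (fun t => PySem.Str.lower t == k)).isSome)
      rw [PySem.Dict.getD, pv_fold_get, hv]
      simp [PySem.Dict.get?, PySem.Dict.empty, hg, hv]
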